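-- pv_equiv track=rewrite | github.com/Wisien999/matura-informatyka | zbiór inf/Coding/60/60-2.py | nadzielniki
-- ===== SOURCE A (Python) =====
-- def nadzielniki(num):
--     div = []
--     ile = 0
--     for i in range(1, num+1):
--         if num % i == 0:
--             div.append(i)
--             ile += 1
--         if ile > 18:
--             return False, []
--     return ile == 18, div
-- ===== SOURCE B (Python) =====
-- def nadzielniki(num):
--     small = []
--     large = []
--     i = 1
--     while i * i <= num:
--         if num % i == 0:
--             small.append(i)
--             q = num // i
--             if q != i:
--                 large.append(q)
--         i += 1
--     div = small + large[::-1]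
--     if len(div) > 18:
--         return False, []
--     return len(div) == 18, div
-- ===== Notes on version B (the rewrite author's own statement) =====
-- stated objective: faster
-- what changed: B enumerates candidate divisors only up to sqrt(num), collecting each small divisor together with its cofactor, and concatenates the small list with the reversed cofactor list, instead of trial-dividing every candidate up to num itself.
import Mathlib
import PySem

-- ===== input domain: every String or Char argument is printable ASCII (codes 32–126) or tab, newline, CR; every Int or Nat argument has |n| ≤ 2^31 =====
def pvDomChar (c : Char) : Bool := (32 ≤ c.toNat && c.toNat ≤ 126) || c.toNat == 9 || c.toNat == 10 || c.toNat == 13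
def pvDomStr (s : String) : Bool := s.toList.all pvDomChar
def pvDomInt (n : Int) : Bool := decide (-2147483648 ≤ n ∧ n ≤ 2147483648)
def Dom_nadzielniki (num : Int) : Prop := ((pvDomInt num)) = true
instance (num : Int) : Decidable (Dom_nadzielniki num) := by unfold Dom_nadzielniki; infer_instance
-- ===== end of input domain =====

-- B enumerates divisors only up to sqrt(num) and pairs each with its cofactor (asymptotically faster); A trial-divides every candidate up to num itself.

-- ===== PORT A =====
-- the for-loop of A: state (div, ile), early return (False, []) as soon as ile > 18
def nadzielnikiLoop (num : Int) : List Int → List Int → Int → Bool × List Int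
  | [], div, ile => (decide (ile = 18), div)
  | i :: rest, div, ile =>
    let div' := if PySem.Int.mod num i == 0 then div ++ [i] else div
    let ile' := if PySem.Int.mod num i == 0 then ile + 1 else ile
    if 18 < ile' then (false, []) else nadzielnikiLoop num rest div' ile'

def nadzielniki (num : Int) : Bool × List Int :=
  nadzielnikiLoop num (PySem.List.pyRange 1 (num + 1) 1) [] 0

-- ===== PORT B =====
-- termination helper for the while-loop: i * i ≤ num entails i ≤ num
theorem pv_le_of_sq_le (i num : Int) (h : i * i ≤ num) : i ≤ num := by
  rcases le_or_gt i 0 with hi | hi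
  · nlinarith [mul_self_nonneg i]
  · nlinarith

-- the while-loop of B: collect small divisors and their cofactors
def nadzielnikiAltLoop (num i : Int) (small large : List Int) : List Int × List Int :=
  if h : i * i ≤ num then
    if PySem.Int.mod num i == 0 then
      if PySem.Int.floordiv num i != i then
        nadzielnikiAltLoop num (i + 1) (small ++ [i]) (large ++ [PySem.Int.floordiv num i])
      else
        nadzielnikiAltLoop num (i + 1) (small ++ [i]) large
    else nadzielnikiAltLoop num (i + 1) small large
  else (small, large)
termination_by (num + 1 - i).toNat
decreasing_by all_goals (have := pv_le_of_sq_le i num h; omega)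

def nadzielniki_alt (num : Int) : Bool × List Int :=
  let p := nadzielnikiAltLoop num 1 [] []
  let div := p.1 ++ p.2.reverse   -- small + large[::-1]
  if 18 < div.length then (false, [])
  else (decide (div.length = 18), div)

-- ===== PRECONDITION & SPEC =====
def Spec_nadzielniki (num : Int) (out : Bool × List Int) : Prop := out = nadzielniki_alt num
instance (num : Int) (out : Bool × List Int) : Decidable (Spec_nadzielniki num out) := by unfold Spec_nadzielniki; infer_instance

-- ===== CLAIM (what is proved, stated in full; the proofs are below) =====
def Claim_equal_nadzielniki : Prop := ∀ (num : Int), Dom_nadzielniki num → Spec_nadzielniki num (nadzielniki num)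

-- ===== LEMMAS AND PROOFS =====

-- the sorted list of all divisors of num in [1, num], and the shared output shape
def pvDvs (num : Int) : List Int :=
  (PySem.List.pyRange 1 (num + 1) 1).filter (fun i => PySem.Int.mod num i == 0)

def pvOut (d : List Int) : Bool × List Int :=
  if 18 < d.length then (false, []) else (decide (d.length = 18), d)

-- small divisors from i upward, in increasing order
def pvSmalls (num i : Int) : List Int :=
  (PySem.List.pyRange i (num + 1) 1).filter
    (fun j => decide (j * j ≤ num) && (PySem.Int.mod num j == 0))

-- cofactors of the proper small divisors from i upward
def pvLarges (num i : Int) : List Int :=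
  ((PySem.List.pyRange i (num + 1) 1).filter
    (fun j => decide (j * j < num) && (PySem.Int.mod num j == 0))).map
    (fun j => PySem.Int.floordiv num j)

theorem pvLoopA_spec (num : Int) :
    ∀ (rest acc : List Int), acc.length ≤ 18 →
      nadzielnikiLoop num rest acc (acc.length : Int) =
        pvOut (acc ++ rest.filter (fun i => PySem.Int.mod num i == 0)) := by
  intro rest
  induction rest with
  | nil =>
      intro acc h
      simp only [nadzielnikiLoop, List.filter_nil, List.append_nil, pvOut]
      rw [if_neg (by omega)]
      have : ((acc.length : Int) = 18) = (acc.length = 18) := by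
        apply propext; constructor <;> intro hh <;> omega
      simp [this]
  | cons i rest ih =>
      intro acc h
      simp only [nadzielnikiLoop, List.filter_cons]
      by_cases hd : (PySem.Int.mod num i == 0) = true
      · simp only [hd, if_true]
        by_cases h18 : acc.length = 18
        · rw [if_pos (by omega)]
          have hlen : 18 < (acc ++ i :: List.filter (fun i => PySem.Int.mod num i == 0) rest).length := by
            simp [h18]
          simp [pvOut]; omega
        · rw [if_neg (by omega)]
          have hcast : (acc.length : Int) + 1 = (((acc ++ [i]).length : Nat) : Int) := by
            simp
          rw [hcast, ih (acc ++ [i]) (by rw [List.length_append]; simp; omega)]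
          simp
      · simp only [Bool.not_eq_true] at hd
        simp only [hd, Bool.false_eq_true, if_false]
        rw [if_neg (by omega)]
        exact ih acc h

theorem pvSmalls_nil (num i : Int) (h1 : 1 ≤ i) (hgt : num < i * i) : pvSmalls num i = [] := by
  rw [pvSmalls, List.filter_eq_nil_iff]
  intro j hj hp
  have hj' := (PySem.List.mem_pyRange_one).mp hj
  simp only [Bool.and_eq_true, decide_eq_true_eq] at hp
  nlinarith [hj'.1, hp.1]

theorem pvLarges_nil (num i : Int) (h1 : 1 ≤ i) (hgt : num < i * i) : pvLarges num i = [] := by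
  rw [pvLarges]
  have : List.filter (fun j => decide (j * j < num) && (PySem.Int.mod num j == 0))
      (PySem.List.pyRange i (num + 1) 1) = [] := by
    rw [List.filter_eq_nil_iff]
    intro j hj hp
    have hj' := (PySem.List.mem_pyRange_one).mp hj
    simp only [Bool.and_eq_true, decide_eq_true_eq] at hp
    nlinarith [hj'.1, hp.1]
  rw [this]; rfl

theorem pvLoopB_spec (num : Int) :
    ∀ (k : Nat) (i : Int) (small large : List Int), 1 ≤ i → (num + 1 - i).toNat = k →
      nadzielnikiAltLoop num i small large =
        (small ++ pvSmalls num i, large ++ pvLarges num i) := by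
  intro k
  induction k with
  | zero =>
      intro i small large h1 hk
      have hi' : num + 1 ≤ i := by omega
      have hgt : num < i * i := by nlinarith
      rw [nadzielnikiAltLoop, dif_neg (by omega : ¬ i * i ≤ num),
        pvSmalls_nil num i h1 hgt, pvLarges_nil num i h1 hgt]
      simp
  | succ k ih =>
      intro i small large h1 hk
      by_cases hsq : i * i ≤ num
      · have hle : i ≤ num := pv_le_of_sq_le i num hsq
        have hiub : i < num + 1 := by omega
        have hmeas : (num + 1 - (i + 1)).toNat = k := by omega
        rw [nadzielnikiAltLoop, dif_pos hsq, pvSmalls, pvLarges,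
          PySem.List.pyRange_one_cons hiub, List.filter_cons, List.filter_cons]
        by_cases hd : (PySem.Int.mod num i == 0) = true
        · have hd' : PySem.Int.mod num i = 0 := by simpa using hd
          have hdvd : i ∣ num := (PySem.Int.mod_eq_zero_iff_dvd num i).mp hd'
          have hfd : PySem.Int.floordiv num i = num / i :=
            PySem.Int.floordiv_eq_ediv_of_pos (by omega)
          have hqmul : num / i * i = num := Int.ediv_mul_cancel hdvd
          by_cases hne : PySem.Int.floordiv num i = i
          · -- cofactor equals i: i * i = num, no large entry
            have hsqeq : i * i = num := by rw [← hqmul, ← hfd, hne]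
            have hnlt : ¬ (i * i < num) := by omega
            simp only [hne, bne_self_eq_false, Bool.false_eq_true, if_false, hd]
            rw [ih (i + 1) (small ++ [i]) large (by omega) hmeas]
            simp only [hsq, decide_true, hnlt, decide_false,
              Bool.false_and, Bool.true_and, if_true, Bool.false_eq_true, if_false]
            simp [pvSmalls, pvLarges]
          · -- proper pair: i * i < num, cofactor prepends to large
            have hlt : i * i < num := by
              rcases lt_or_eq_of_le hsq with h | h
              · exact h
              · exfalso; apply hne
                rw [hfd]
                have : num / i * i = i * i := by rw [hqmul, h]
                exact mul_right_cancel₀ (by omega : i ≠ 0) this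
            have hbne : (PySem.Int.floordiv num i != i) = true := by
              simpa using hne
            simp only [hbne, if_true, hd]
            rw [ih (i + 1) (small ++ [i]) (large ++ [PySem.Int.floordiv num i]) (by omega) hmeas]
            simp only [hsq, decide_true, hlt, Bool.true_and, if_true, List.map_cons]
            simp [pvSmalls, pvLarges, hfd]
        · have hd' : (PySem.Int.mod num i == 0) = false := by
            simpa using hd
          simp only [hd', Bool.and_false, Bool.false_eq_true, if_false]
          rw [ih (i + 1) small large (by omega) hmeas]
          simp [pvSmalls, pvLarges]
      · have hgt : num < i * i := by omega
        rw [nadzielnikiAltLoop, dif_neg hsq,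
          pvSmalls_nil num i h1 hgt, pvLarges_nil num i h1 hgt]
        simp

-- arithmetic facts about the cofactor num / j of a divisor j of num
theorem pvCof (num j : Int) (hn : 1 ≤ num) (hj : 1 ≤ j) (hd : j ∣ num) :
    1 ≤ num / j ∧ num / j ≤ num ∧ num / j ∣ num ∧ num / j * j = num := by
  have hmul : num / j * j = num := Int.ediv_mul_cancel hd
  have h1 : 1 ≤ num / j := by nlinarith
  refine ⟨h1, by nlinarith, ⟨j, by linarith⟩, hmul⟩

-- membership characterizations
theorem pvMem_smalls (num x : Int) (_hn : 1 ≤ num) :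
    x ∈ pvSmalls num 1 ↔ 1 ≤ x ∧ x ≤ num ∧ x * x ≤ num ∧ x ∣ num := by
  simp only [pvSmalls, List.mem_filter, PySem.List.mem_pyRange_one, Bool.and_eq_true,
    decide_eq_true_eq, beq_iff_eq, PySem.Int.mod_eq_zero_iff_dvd]
  constructor
  · rintro ⟨⟨ha, hb⟩, hc, hd⟩; exact ⟨ha, by omega, hc, hd⟩
  · rintro ⟨ha, hb, hc, hd⟩; exact ⟨⟨ha, by omega⟩, hc, hd⟩

theorem pvMem_larges (num x : Int) (hn : 1 ≤ num) :
    x ∈ pvLarges num 1 ↔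
      ∃ j, 1 ≤ j ∧ j * j < num ∧ j ∣ num ∧ x = num / j := by
  simp only [pvLarges, List.mem_map, List.mem_filter, PySem.List.mem_pyRange_one,
    Bool.and_eq_true, decide_eq_true_eq, beq_iff_eq, PySem.Int.mod_eq_zero_iff_dvd]
  constructor
  · rintro ⟨j, ⟨⟨ha, hb⟩, hc, hd⟩, hx⟩
    refine ⟨j, ha, hc, hd, ?_⟩
    rw [← hx, PySem.Int.floordiv_eq_ediv_of_pos (by omega)]
  · rintro ⟨j, ha, hc, hd, hx⟩
    refine ⟨j, ⟨⟨ha, ?_⟩, hc, hd⟩, ?_⟩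
    · nlinarith [Int.le_of_dvd (by omega) hd]
    · rw [PySem.Int.floordiv_eq_ediv_of_pos (by omega), hx]

theorem pvMem_dvs (num x : Int) :
    x ∈ pvDvs num ↔ 1 ≤ x ∧ x ≤ num ∧ x ∣ num := by
  simp only [pvDvs, List.mem_filter, PySem.List.mem_pyRange_one, beq_iff_eq,
    PySem.Int.mod_eq_zero_iff_dvd]
  constructor
  · rintro ⟨⟨h1, h2⟩, h3⟩; exact ⟨h1, by omega, h3⟩
  · rintro ⟨h1, h2, h3⟩; exact ⟨⟨h1, by omega⟩, h3⟩

theorem pvMerge (num : Int) :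
    pvSmalls num 1 ++ (pvLarges num 1).reverse = pvDvs num := by
  rcases le_or_gt num 0 with hn | hn
  · have hnil : PySem.List.pyRange 1 (num + 1) 1 = [] :=
      PySem.List.pyRange_one_eq_nil (by omega)
    simp [pvSmalls, pvLarges, pvDvs, hnil]
  · have hn1 : 1 ≤ num := hn
    -- pairwise facts
    have hPS : (pvSmalls num 1).Pairwise (· < ·) :=
      (PySem.List.pairwise_lt_pyRange_one 1 (num + 1)).filter _
    have hPD : (pvDvs num).Pairwise (· < ·) :=
      (PySem.List.pairwise_lt_pyRange_one 1 (num + 1)).filter _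
    have hPLrev : ((pvLarges num 1).reverse).Pairwise (· < ·) := by
      rw [List.pairwise_reverse]
      rw [pvLarges, List.pairwise_map]
      refine List.Pairwise.imp_of_mem ?_
        ((PySem.List.pairwise_lt_pyRange_one 1 (num + 1)).filter _)
      intro a b ha hb hab
      simp only [List.mem_filter, PySem.List.mem_pyRange_one, Bool.and_eq_true,
        decide_eq_true_eq, beq_iff_eq, PySem.Int.mod_eq_zero_iff_dvd] at ha hb
      have hfa : PySem.Int.floordiv num a = num / a :=
        PySem.Int.floordiv_eq_ediv_of_pos (by omega)
      have hfb : PySem.Int.floordiv num b = num / b :=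
        PySem.Int.floordiv_eq_ediv_of_pos (by omega)
      rw [hfa, hfb]
      obtain ⟨ha1, hha, hda⟩ := pvCof num a hn1 (by omega) ha.2.2
      obtain ⟨hb1, hhb, hdb⟩ := pvCof num b hn1 (by omega) hb.2.2
      nlinarith [hda.2, hdb.2, ha.1.1, hb.1.1]
    have hcross : ∀ a ∈ pvSmalls num 1, ∀ b ∈ (pvLarges num 1).reverse, a < b := by
      intro a ha b hb
      rw [List.mem_reverse] at hb
      rw [pvMem_smalls num a hn1] at ha
      rw [pvMem_larges num b hn1] at hb
      obtain ⟨j, hj1, hjj, hjd, hbx⟩ := hb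
      obtain ⟨hb1, hhb, hdb, hmul⟩ := pvCof num j hn1 hj1 hjd
      subst hbx
      have hjy : j < num / j := by nlinarith
      have hyy : num < num / j * (num / j) := by nlinarith
      nlinarith [ha.1, ha.2.2.1]
    have hPL : (pvSmalls num 1 ++ (pvLarges num 1).reverse).Pairwise (· < ·) :=
      List.pairwise_append.mpr ⟨hPS, hPLrev, hcross⟩
    -- same membership
    have hmem : ∀ x, x ∈ pvSmalls num 1 ++ (pvLarges num 1).reverse ↔ x ∈ pvDvs num := by
      intro x
      rw [List.mem_append, List.mem_reverse, pvMem_smalls num x hn1,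
        pvMem_larges num x hn1, pvMem_dvs num x]
      constructor
      · rintro (⟨h1, h2, _, h4⟩ | ⟨j, hj1, hjj, hjd, hx⟩)
        · exact ⟨h1, h2, h4⟩
        · obtain ⟨hb1, hhb, hdb, hmul⟩ := pvCof num j hn1 hj1 hjd
          subst hx
          exact ⟨hb1, hhb, hdb⟩
      · rintro ⟨h1, h2, h3⟩
        by_cases hsq : x * x ≤ num
        · exact Or.inl ⟨h1, h2, hsq, h3⟩
        · refine Or.inr ⟨num / x, ?_, ?_, ?_, ?_⟩
          · exact (pvCof num x hn1 h1 h3).1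
          · obtain ⟨hj1, hjn, hjd, hjm⟩ := pvCof num x hn1 h1 h3
            nlinarith
          · exact (pvCof num x hn1 h1 h3).2.2.1
          · obtain ⟨hj1, hjn, hjd, hjm⟩ := pvCof num x hn1 h1 h3
            have hx0 : num / x ≠ 0 := by omega
            calc x = num / x * x / (num / x) := by
                    rw [Int.mul_ediv_cancel_left _ hx0]
              _ = num / (num / x) := by rw [hjm]
    -- nodup, perm, conclusion
    have ndL : (pvSmalls num 1 ++ (pvLarges num 1).reverse).Nodup :=
      hPL.imp (fun h => ne_of_lt h)
    have ndR : (pvDvs num).Nodup := hPD.imp (fun h => ne_of_lt h)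
    have hperm : (pvSmalls num 1 ++ (pvLarges num 1).reverse).Perm (pvDvs num) :=
      (List.perm_ext_iff_of_nodup ndL ndR).mpr hmem
    exact PySem.List.eq_of_perm_of_pairwise_le_of_injective (fun x => x)
      (fun a b h => h) hperm (hPL.imp (fun h => le_of_lt h)) (hPD.imp (fun h => le_of_lt h))

-- ===== VERDICT (by name: the statement is the Claim_ definition above) =====
theorem nadzielniki_spec : Claim_equal_nadzielniki := by
  intro num _
  unfold Spec_nadzielniki nadzielniki nadzielniki_alt
  have hA := pvLoopA_spec num (PySem.List.pyRange 1 (num + 1) 1) [] (by simp)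
  have hB := pvLoopB_spec num (num + 1 - 1).toNat 1 [] [] le_rfl rfl
  simp only [List.length_nil, Int.natCast_zero, List.nil_append] at hA hB
  rw [hA, hB]
  simp only [pvMerge num]
  rfl
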